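-- pv_equiv track=rewrite | github.com/hansmaulwurf23/aoc | 2016/day 14/d14_1.py | find_good_stuff
-- ===== SOURCE A (Python) =====
-- def find_good_stuff(hexhash):
--     i = 0
--     last = None
--     tripple = None
--     quintuple = None
--     while i < len(hexhash) and (not tripple or not quintuple):
--         if hexhash[i] != last:
--             last = hexhash[i]
--             i += 1
--         elif i < len(hexhash) - 3 and hexhash[i + 1] == hexhash[i + 2] == hexhash[i + 3] == last:
--             if quintuple is None: quintuple = last
--             if tripple is None: tripple = last
--             i += 4
--         elif i < len(hexhash) - 1 and hexhash[i + 1] == last: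
--             if tripple is None: tripple = last
--             i += 2
--         else:
--             i += 1
--
--     return tripple, quintuple
-- ===== SOURCE B (Python) =====
-- def find_good_stuff(hexhash):
--     # Scan the string as maximal runs of equal characters; take the first run
--     # of length >= 3 for the triple and the first of length >= 5 for the quintuple.
--     tripple = None
--     quintuple = None
--     n = len(hexhash)
--     j = 0
--     while j < n:
--         k = j
--         while k < n and hexhash[k] == hexhash[j]:
--             k += 1
--         run = k - j
--         if tripple is None and run >= 3:
--             tripple = hexhash[j]
--         if quintuple is None and run >= 5:
--             quintuple = hexhash[j]
--         if tripple is not None and quintuple is not None: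
--             break
--         j = k
--     return tripple, quintuple
-- ===== Notes on version B (the rewrite author's own statement) =====
-- stated objective: simpler
-- what changed: Replaces A's pointer-jumping lookahead automaton (index jumps of 1/2/4 with a 'last' register and chained index guards) by a plain scan over maximal runs of equal characters: first run of length >= 3 gives the triple, first of length >= 5 the quintuple.
import Mathlib
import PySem

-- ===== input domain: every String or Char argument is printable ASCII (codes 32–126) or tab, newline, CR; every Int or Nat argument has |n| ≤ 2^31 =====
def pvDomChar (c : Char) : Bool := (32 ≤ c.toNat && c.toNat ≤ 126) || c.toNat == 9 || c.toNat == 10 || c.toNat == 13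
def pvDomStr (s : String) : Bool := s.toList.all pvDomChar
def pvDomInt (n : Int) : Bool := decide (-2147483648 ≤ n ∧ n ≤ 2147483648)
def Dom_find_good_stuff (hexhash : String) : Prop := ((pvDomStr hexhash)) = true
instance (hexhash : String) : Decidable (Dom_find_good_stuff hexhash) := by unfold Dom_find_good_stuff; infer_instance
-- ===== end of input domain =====

-- B replaces A's pointer-jumping lookahead automaton by a plain scan over maximal
-- runs of equal characters (first run ≥ 3 → triple, first run ≥ 5 → quintuple); simpler.
-- Python's 1-character strings h[i] / `last` are modelled as Char (equality of
-- 1-char strings coincides with Char equality); the returned values are the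
-- corresponding 1-character Strings, None ↦ none.

-- ===== PORT A =====
-- Literal port of A's while-loop: index i, `last`, tripple, quintuple.
-- Loop guard `not tripple or not quintuple`: tripple/quintuple are None or a
-- non-empty 1-char string, so Python truthiness is exactly `≠ none`.
-- All indexing l.getD (i+j) ' ' happens under guards that put i+j in range,
-- so it is exact (Python never raises here).  `i < len-3` / `i < len-1` are
-- Python int comparisons, ported over Int.
def fgsA (l : List Char) (i : Nat) (last : Option Char) (t q : Option String) :
    Option String × Option String :=
  if hi : i < l.length ∧ (t = none ∨ q = none) then
    let c := l.getD i ' '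
    if some c ≠ last then
      fgsA l (i + 1) (some c) t q
    else if (i : Int) < (l.length : Int) - 3 ∧ l.getD (i+1) ' ' = c ∧
             l.getD (i+2) ' ' = c ∧ l.getD (i+3) ' ' = c then
      -- chain hexhash[i+1] == hexhash[i+2] == hexhash[i+3] == last (= c here)
      let q' := if q = none then some (String.ofList [c]) else q
      let t' := if t = none then some (String.ofList [c]) else t
      fgsA l (i + 4) last t' q'
    else if (i : Int) < (l.length : Int) - 1 ∧ l.getD (i+1) ' ' = c then
      let t' := if t = none then some (String.ofList [c]) else t
      fgsA l (i + 2) last t' q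
    else
      fgsA l (i + 1) last t q
  else (t, q)
termination_by l.length - i
decreasing_by all_goals omega

def find_good_stuff (hexhash : String) : Option String × Option String :=
  fgsA hexhash.toList 0 none none none

-- ===== PORT B =====
-- inner while-loop of B: length of the maximal prefix of equal characters c
def fgsRun (c : Char) : List Char → Nat
  | [] => 0
  | x :: xs => if x = c then fgsRun c xs + 1 else 0

-- outer loop of B over the run starts j (structural: current suffix = hexhash[j:])
def fgsAlt : List Char → Option String → Option String → Option String × Option String
  | [], t, q => (t, q)
  | c :: rest, t, q =>
    let run := fgsRun c rest + 1
    let t' := if t = none ∧ 3 ≤ run then some (String.ofList [c]) else t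
    let q' := if q = none ∧ 5 ≤ run then some (String.ofList [c]) else q
    if t' ≠ none ∧ q' ≠ none then (t', q')
    else fgsAlt (rest.drop (run - 1)) t' q'
termination_by l => l.length
decreasing_by simp

def find_good_stuff_alt (hexhash : String) : Option String × Option String :=
  fgsAlt hexhash.toList none none

-- ===== PRECONDITION & SPEC =====
def Spec_find_good_stuff (hexhash : String) (out : Option String × Option String) : Prop := out = find_good_stuff_alt hexhash
instance (hexhash : String) (out : Option String × Option String) : Decidable (Spec_find_good_stuff hexhash out) := by unfold Spec_find_good_stuff; infer_instance

-- ===== CLAIM (what is proved, stated in full; the proofs are below) =====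
def Claim_equal_find_good_stuff : Prop := ∀ (hexhash : String), Dom_find_good_stuff hexhash → Spec_find_good_stuff hexhash (find_good_stuff hexhash)

-- ===== LEMMAS AND PROOFS =====

-- A's loop re-expressed on the suffix hexhash[i:] (proved equal to fgsA below)
def fgsA' : List Char → Option Char → Option String → Option String →
    Option String × Option String
  | [], _, t, q => (t, q)
  | c :: rest, last, t, q =>
    if t ≠ none ∧ q ≠ none then (t, q)
    else if some c ≠ last then fgsA' rest (some c) t q
    else if 3 < rest.length + 1 ∧ rest.getD 0 ' ' = c ∧ rest.getD 1 ' ' = c ∧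
             rest.getD 2 ' ' = c then
      let q' := if q = none then some (String.ofList [c]) else q
      let t' := if t = none then some (String.ofList [c]) else t
      fgsA' (rest.drop 3) last t' q'
    else if 1 < rest.length + 1 ∧ rest.getD 0 ' ' = c then
      let t' := if t = none then some (String.ofList [c]) else t
      fgsA' (rest.drop 1) last t' q
    else fgsA' rest last t q
termination_by l => l.length
decreasing_by all_goals simp

lemma fgsA'_both (l : List Char) (last : Option Char) (t q : Option String)
    (ht : t ≠ none) (hq : q ≠ none) : fgsA' l last t q = (t, q) := by
  cases l with
  | nil => simp [fgsA']
  | cons c rest => simp [fgsA', ht, hq]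

lemma fgsRun_prefix (c : Char) (l : List Char) :
    List.replicate (fgsRun c l) c ++ l.drop (fgsRun c l) = l := by
  induction l with
  | nil => simp [fgsRun]
  | cons x xs ih =>
    by_cases hx : x = c
    · simp [fgsRun, hx, List.replicate_succ] at *; exact ih
    · simp [fgsRun, hx]

lemma fgsRun_head (c : Char) (l : List Char) :
    (l.drop (fgsRun c l)).head? ≠ some c := by
  induction l with
  | nil => simp [fgsRun]
  | cons x xs ih =>
    by_cases hx : x = c
    · simpa [fgsRun, hx] using ih
    · simp [fgsRun, hx]

lemma fgsA_eq_fgsA' (N : Nat) (l : List Char) (i : Nat) (last : Option Char)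
    (t q : Option String) (hN : l.length - i ≤ N) :
    fgsA l i last t q = fgsA' (l.drop i) last t q := by
  induction N generalizing i last t q with
  | zero =>
    rw [fgsA]
    have h1 : ¬ i < l.length := by omega
    have h2 : l.drop i = [] := List.drop_eq_nil_of_le (by omega)
    simp [h1, h2, fgsA']
  | succ N ih =>
    rw [fgsA]
    by_cases hi : i < l.length
    · have hdrop : l.drop i = l[i] :: l.drop (i + 1) := List.drop_eq_getElem_cons hi
      set c := l[i] with hc
      set rest := l.drop (i + 1) with hrest
      have hcd : l.getD i ' ' = c := List.getD_eq_getElem l ' ' hi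
      have hlen : rest.length = l.length - (i + 1) := by
        rw [hrest, List.length_drop]
      have hg : ∀ j : Nat, l.getD (i + 1 + j) ' ' = rest.getD j ' ' := by
        intro j
        simp [List.getD, hrest, List.getElem?_drop]
      have hq : ((i : Int) < (l.length : Int) - 3) ↔ (3 < rest.length + 1) := by
        omega
      have ht : ((i : Int) < (l.length : Int) - 1) ↔ (1 < rest.length + 1) := by
        omega
      have hd2 : l.drop (i + 2) = rest.drop 1 := by
        rw [hrest, List.drop_drop]
      have hd4 : l.drop (i + 4) = rest.drop 3 := by
        rw [hrest, List.drop_drop]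
      rw [hdrop, fgsA']
      by_cases hb : t = none ∨ q = none
      · simp only [hi, hb, and_self, dif_pos, hcd]
        have hb' : ¬ (t ≠ none ∧ q ≠ none) := by tauto
        simp only [hb', if_false]
        have e1 : l.getD (i + 1) ' ' = rest.getD 0 ' ' := by
          simpa using hg 0
        have e2 : l.getD (i + 2) ' ' = rest.getD 1 ' ' := by
          simpa using hg 1
        have e3 : l.getD (i + 3) ' ' = rest.getD 2 ' ' := by
          simpa using hg 2
        rw [e1, e2, e3]
        by_cases hm : some c ≠ last
        · rw [if_pos hm, if_pos hm, ih (i + 1) (some c) t q (by omega)]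
        · rw [if_neg hm, if_neg hm]
          by_cases h5 : 3 < rest.length + 1 ∧ rest.getD 0 ' ' = c ∧
              rest.getD 1 ' ' = c ∧ rest.getD 2 ' ' = c
          · have h5' : (i : Int) < (l.length : Int) - 3 ∧ rest.getD 0 ' ' = c ∧
                rest.getD 1 ' ' = c ∧ rest.getD 2 ' ' = c := by
              exact ⟨hq.mpr h5.1, h5.2⟩
            rw [if_pos h5', if_pos h5, ih (i + 4) last _ _ (by omega), hd4]
          · have h5' : ¬ ((i : Int) < (l.length : Int) - 3 ∧ rest.getD 0 ' ' = c ∧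
                rest.getD 1 ' ' = c ∧ rest.getD 2 ' ' = c) := by
              intro h; exact h5 ⟨hq.mp h.1, h.2⟩
            rw [if_neg h5', if_neg h5]
            by_cases h3 : 1 < rest.length + 1 ∧ rest.getD 0 ' ' = c
            · have h3' : (i : Int) < (l.length : Int) - 1 ∧ rest.getD 0 ' ' = c :=
                ⟨ht.mpr h3.1, h3.2⟩
              rw [if_pos h3', if_pos h3, ih (i + 2) last _ _ (by omega), hd2]
            · have h3' : ¬ ((i : Int) < (l.length : Int) - 1 ∧ rest.getD 0 ' ' = c) := by
                intro h; exact h3 ⟨ht.mp h.1, h.2⟩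
              rw [if_neg h3', if_neg h3, ih (i + 1) last t q (by omega)]
      · have hb' : t ≠ none ∧ q ≠ none := by tauto
        simp [hb']
    · have h2 : l.drop i = [] := List.drop_eq_nil_of_le (by omega)
      simp [hi, h2, fgsA']


lemma fgsA'_eq_ite (l : List Char) (last : Option Char) (t q : Option String) :
    fgsA' l last t q = if t ≠ none ∧ q ≠ none then (t, q) else fgsA' l last t q := by
  split_ifs with h
  · exact fgsA'_both l last t q h.1 h.2
  · rfl

lemma getD0_ne (rest' : List Char) (c : Char) (hhd : rest'.head? ≠ some c)
    (h : rest' ≠ []) : rest'.getD 0 ' ' ≠ c := by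
  cases rest' with
  | nil => exact absurd rfl h
  | cons x xs => simpa using hhd

lemma A'_run (k : Nat) (c : Char) (rest' : List Char) (t q : Option String)
    (hhd : rest'.head? ≠ some c) (hb : ¬ (t ≠ none ∧ q ≠ none)) :
    fgsA' (List.replicate k c ++ rest') (some c) t q =
      (let t' := if t = none ∧ 3 ≤ k + 1 then some (String.ofList [c]) else t
       let q' := if q = none ∧ 5 ≤ k + 1 then some (String.ofList [c]) else q
       if t' ≠ none ∧ q' ≠ none then (t', q') else fgsA' rest' (some c) t' q') := by
  have hne : ∀ he : rest' ≠ [], rest'.getD 0 ' ' ≠ c := getD0_ne rest' c hhd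
  match k with
  | 0 =>
    simp only [List.replicate, List.nil_append]
    simp [hb]
  | 1 =>
    rw [show List.replicate 1 c ++ rest' = c :: rest' from by simp,
      fgsA', if_neg hb, if_neg (by simp)]
    have hq : ¬ (3 < rest'.length + 1 ∧ rest'.getD 0 ' ' = c ∧
        rest'.getD 1 ' ' = c ∧ rest'.getD 2 ' ' = c) := by
      rintro ⟨hl, h0, -⟩
      exact hne (by intro he; simp [he] at hl) h0
    have ht : ¬ (1 < rest'.length + 1 ∧ rest'.getD 0 ' ' = c) := by
      rintro ⟨hl, h0⟩
      exact hne (by intro he; simp [he] at hl) h0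
    rw [if_neg hq, if_neg ht]
    simp [hb]
  | 2 =>
    rw [show List.replicate 2 c ++ rest' = c :: c :: rest' from by
        simp [List.replicate_succ],
      fgsA', if_neg hb, if_neg (by simp)]
    have hq : ¬ (3 < (c :: rest').length + 1 ∧ (c :: rest').getD 0 ' ' = c ∧
        (c :: rest').getD 1 ' ' = c ∧ (c :: rest').getD 2 ' ' = c) := by
      rintro ⟨hl, -, h1', -⟩
      simp only [List.getD_cons_succ] at h1'
      exact hne (by intro he; simp [he] at hl) h1'
    rw [if_neg hq, if_pos (by simp : 1 < (c :: rest').length + 1 ∧ (c :: rest').getD 0 ' ' = c)]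
    simp only [List.drop_one, List.tail_cons]
    rw [fgsA'_eq_ite rest' (some c) _ q]
    by_cases htn : t = none
    · simp [htn]
    · have hqn : q = none := by tauto
      simp [htn, hqn]
  | 3 =>
    rw [show List.replicate 3 c ++ rest' = c :: c :: c :: rest' from by
        simp [List.replicate_succ],
      fgsA', if_neg hb, if_neg (by simp)]
    have hq : ¬ (3 < (c :: c :: rest').length + 1 ∧ (c :: c :: rest').getD 0 ' ' = c ∧
        (c :: c :: rest').getD 1 ' ' = c ∧ (c :: c :: rest').getD 2 ' ' = c) := by
      rintro ⟨hl, -, -, h2'⟩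
      simp only [List.getD_cons_succ] at h2'
      exact hne (by intro he; simp [he] at hl) h2'
    rw [if_neg hq, if_pos (by simp : 1 < (c :: c :: rest').length + 1 ∧ (c :: c :: rest').getD 0 ' ' = c)]
    simp only [List.drop_one, List.tail_cons]
    -- second step inside the same run
    rw [fgsA']
    set t' := if t = none then some (String.ofList [c]) else t with ht'
    by_cases hb2 : t' ≠ none ∧ q ≠ none
    · rw [if_pos hb2]
      by_cases htn : t = none
      · simp [htn, ht', hb2.2]
      · exact absurd ⟨htn, hb2.2⟩ hb
    · rw [if_neg hb2, if_neg (by simp)]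
      have hq2 : ¬ (3 < rest'.length + 1 ∧ rest'.getD 0 ' ' = c ∧
          rest'.getD 1 ' ' = c ∧ rest'.getD 2 ' ' = c) := by
        rintro ⟨hl, h0, -⟩
        exact hne (by intro he; simp [he] at hl) h0
      have ht2 : ¬ (1 < rest'.length + 1 ∧ rest'.getD 0 ' ' = c) := by
        rintro ⟨hl, h0⟩
        exact hne (by intro he; simp [he] at hl) h0
      rw [if_neg hq2, if_neg ht2]
      by_cases htn : t = none
      · have hqn : q = none := by
          by_contra hqn
          exact hb2 ⟨by simp [ht', htn], hqn⟩
        simp [htn, hqn, ht']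
      · have hqn : q = none := by tauto
        simp [htn, hqn, ht']
  | (m + 4) =>
    rw [show List.replicate (m + 4) c ++ rest' =
        c :: c :: c :: c :: (List.replicate m c ++ rest') from by
        simp [List.replicate_succ],
      fgsA', if_neg hb, if_neg (by simp)]
    rw [if_pos (by simp : 3 < (c :: c :: c :: (List.replicate m c ++ rest')).length + 1 ∧
        (c :: c :: c :: (List.replicate m c ++ rest')).getD 0 ' ' = c ∧
        (c :: c :: c :: (List.replicate m c ++ rest')).getD 1 ' ' = c ∧
        (c :: c :: c :: (List.replicate m c ++ rest')).getD 2 ' ' = c)]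
    have hts : (if t = none then some (String.ofList [c]) else t) ≠ none := by
      by_cases htn : t = none <;> simp [htn]
    have hqs : (if q = none then some (String.ofList [c]) else q) ≠ none := by
      by_cases hqn : q = none <;> simp [hqn]
    rw [fgsA'_both _ _ _ _ hts hqs]
    have h3 : (3:Nat) ≤ m + 4 + 1 := by omega
    have h5 : (5:Nat) ≤ m + 4 + 1 := by omega
    by_cases htn : t = none <;> by_cases hqn : q = none
    · simp [htn, hqn, h3, h5]
    · simp [htn, hqn, h3, h5]
    · simp [htn, hqn, h3, h5]
    · exact absurd ⟨htn, hqn⟩ hb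

lemma A'_eq_alt (N : Nat) (l : List Char) (last : Option Char) (t q : Option String)
    (hN : l.length ≤ N) (hhd : ∀ c, l.head? = some c → last ≠ some c)
    (hb : ¬ (t ≠ none ∧ q ≠ none)) :
    fgsA' l last t q = fgsAlt l t q := by
  induction N generalizing l last t q with
  | zero =>
    have hl : l = [] := List.eq_nil_of_length_eq_zero (by omega)
    subst hl
    rw [fgsA', fgsAlt]
  | succ N ih =>
    cases l with
    | nil => rw [fgsA', fgsAlt]
    | cons c rest =>
      have hlast : some c ≠ last := fun h => hhd c rfl h.symm
      rw [fgsA', if_neg hb, if_pos hlast]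
      have hpre := fgsRun_prefix c rest
      have hh2 := fgsRun_head c rest
      set k := fgsRun c rest with hk
      conv_lhs => rw [← hpre]
      rw [A'_run k c (rest.drop k) t q hh2 hb, fgsAlt]
      simp only [Nat.add_sub_cancel]
      set t' := if t = none ∧ 3 ≤ k + 1 then some (String.ofList [c]) else t with ht'
      set q' := if q = none ∧ 5 ≤ k + 1 then some (String.ofList [c]) else q with hq'
      split_ifs with h
      · rfl
      · apply ih
        · have : (c :: rest).length ≤ N + 1 := hN
          simp only [List.length_cons] at this
          simp only [List.length_drop]
          omega
        · intro c' hc' heq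
          apply hh2
          rw [hc']
          injection heq with h'
          rw [h']
        · exact h

-- ===== VERDICT (by name: the statement is the Claim_ definition above) =====
theorem find_good_stuff_spec : Claim_equal_find_good_stuff := by
  intro h _
  unfold Spec_find_good_stuff find_good_stuff find_good_stuff_alt
  rw [fgsA_eq_fgsA' h.toList.length h.toList 0 none none none (by omega)]
  simp only [List.drop_zero]
  exact A'_eq_alt h.toList.length h.toList none none none le_rfl
    (by intro c _ hc; cases hc) (by simp)
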